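-- pv_equiv track=rewrite | github.com/KumarAmbuj/gfg_string_python_2 | 13.sequence matcher.py | findmatcher
-- ===== SOURCE A (Python) =====
-- def findmatcher(str1,str2):
--     l=[]
--     dic={}
--
--     for x in str1:
--         if x in dic:
--             dic[x]+=1
--         else:
--             dic[x]=1
--
--     path=[]
--
--     for x in str2:
--         if x in dic and dic[x]>0:
--             path.append(x)
--             dic[x]-=1
--         else:
--             l.append(path)
--             path=[]
--
--     ans=''
--     m=0
--
--     for x in l:
--         if len(x)>m:
--             m=len(x)
--             ans=''.join(x)
--     return ans
-- ===== SOURCE B (Python) =====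
-- def findmatcher(str1, str2):
--     counts = {}
--     for c in str1:
--         counts[c] = counts.get(c, 0) + 1
--     # record only the INDICES of str2 where the greedy depleting match fails
--     fails = []
--     for i, c in enumerate(str2):
--         if counts.get(c, 0) > 0:
--             counts[c] -= 1
--         else:
--             fails.append(i)
--     # the runs A considers are exactly the stretches between consecutive fail
--     # indices (the stretch after the last fail is never considered, as in A);
--     # pick the first longest by pure index arithmetic and slice it out
--     best = ''
--     prev = -1
--     for i in fails:
--         if i - prev - 1 > len(best):
--             best = str2[prev + 1:i]
--         prev = i
--     return best
-- ===== Notes on version B (the rewrite author's own statement) =====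
-- stated objective: alternative
-- what changed: B never accumulates run contents or a list of runs: it records only the indices of str2 where the depleting match fails, then picks the best run by index arithmetic (i - prev - 1) and materialises it once as a slice str2[prev+1:i], instead of A's appending chars to a path list, collecting paths and join-scanning them.
import Mathlib
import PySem

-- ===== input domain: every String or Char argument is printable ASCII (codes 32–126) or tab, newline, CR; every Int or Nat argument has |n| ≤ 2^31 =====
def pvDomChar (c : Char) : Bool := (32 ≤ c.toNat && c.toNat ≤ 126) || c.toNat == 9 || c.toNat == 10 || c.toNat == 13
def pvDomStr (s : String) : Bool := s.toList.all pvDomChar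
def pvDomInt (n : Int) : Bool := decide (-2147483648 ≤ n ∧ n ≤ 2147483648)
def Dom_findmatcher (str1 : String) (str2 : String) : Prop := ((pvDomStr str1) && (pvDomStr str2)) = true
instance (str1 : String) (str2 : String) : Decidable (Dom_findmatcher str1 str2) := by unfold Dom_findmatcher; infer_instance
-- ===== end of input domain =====

-- B records only the indices of str2 where the depleting match fails and reconstructs the
-- best run afterwards by index arithmetic and one slice, instead of A's accumulated run
-- lists; objective: alternative (same cost, different data representation).

-- ===== PORT A =====
def findmatcher (str1 : String) (str2 : String) : String :=
  -- l = [] ; dic = {} ; for x in str1: …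
  let dic : PySem.Dict Char Int :=
    str1.toList.foldl
      (fun dic x => if dic.contains x then dic.modify x 0 (· + 1) else dic.insert x 1)
      PySem.Dict.empty
  -- path = [] ; for x in str2: …   (state = (l, path, dic))
  let st :=
    str2.toList.foldl
      (fun (st : List (List Char) × List Char × PySem.Dict Char Int) x =>
        if st.2.2.contains x ∧ st.2.2.getD x 0 > 0 then
          (st.1, st.2.1 ++ [x], st.2.2.modify x 0 (· - 1))
        else
          (st.1 ++ [st.2.1], [], st.2.2))
      ([], [], dic)
  -- ans = '' ; m = 0 ; for x in l: …
  let fin :=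
    st.1.foldl
      (fun (p : String × Nat) x => if x.length > p.2 then (String.ofList x, x.length) else p)
      ("", 0)
  fin.1

-- ===== PORT B =====
def findmatcher_alt (str1 : String) (str2 : String) : String :=
  -- counts = {} ; for c in str1: counts[c] = counts.get(c, 0) + 1
  let counts : PySem.Dict Char Int :=
    str1.toList.foldl (fun d c => d.insert c (d.getD c 0 + 1)) PySem.Dict.empty
  -- fails = [] ; for i, c in enumerate(str2): …   (state = (counts, fails))
  let st :=
    (PySem.List.enumerate str2.toList).foldl
      (fun (st : PySem.Dict Char Int × List Int) p =>
        if st.1.getD p.2 0 > 0 then (st.1.modify p.2 0 (· - 1), st.2)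
        else (st.1, st.2 ++ [p.1]))
      (counts, [])
  -- best = '' ; prev = -1 ; for i in fails: …   (state = (best, prev))
  let fin :=
    st.2.foldl
      (fun (q : String × Int) i =>
        (if i - q.2 - 1 > PySem.Str.len q.1 then
           String.ofList (PySem.List.slice str2.toList (some (q.2 + 1)) (some i))
         else q.1, i))
      ("", -1)
  fin.1

-- ===== PRECONDITION & SPEC =====
def Spec_findmatcher (str1 : String) (str2 : String) (out : String) : Prop := out = findmatcher_alt str1 str2
instance (str1 : String) (str2 : String) (out : String) : Decidable (Spec_findmatcher str1 str2 out) := by unfold Spec_findmatcher; infer_instance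

-- ===== CLAIM (what is proved, stated in full; the proofs are below) =====
def Claim_equal_findmatcher : Prop := ∀ (str1 : String) (str2 : String), Dom_findmatcher str1 str2 → Spec_findmatcher str1 str2 (findmatcher str1 str2)

-- ===== LEMMAS AND PROOFS =====

-- the two counting loops build the same dict
lemma dict_eq (xs : List Char) :
    xs.foldl (fun d x => if d.contains x then d.modify x 0 (· + 1) else d.insert x 1)
      (PySem.Dict.empty : PySem.Dict Char Int)
    = xs.foldl (fun d c => d.insert c (d.getD c 0 + 1)) PySem.Dict.empty := by
  have hstep : (fun (d : PySem.Dict Char Int) (x : Char) =>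
      if d.contains x then d.modify x 0 (· + 1) else d.insert x 1)
      = fun d c => d.insert c (d.getD c 0 + 1) := by
    funext d x
    by_cases h : d.contains x
    · simp [h, PySem.Dict.modify]
    · simp only [Bool.not_eq_true] at h
      simp [h, PySem.Dict.getD_of_not_contains _ _ h]
  rw [hstep]

-- B's phase-3 step over a fail index, as a function of str2
def bstep (s2 : List Char) (q : String × Int) (i : Int) : String × Int :=
  (if i - q.2 - 1 > PySem.Str.len q.1 then
     String.ofList (PySem.List.slice s2 (some (q.2 + 1)) (some i))
   else q.1, i)

-- fuse B's fail-collecting pass with its phase-3 fold into one fold over enumerate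
lemma fuse (s2 : List Char) (es : List (Int × Char)) (d : PySem.Dict Char Int)
    (fs : List Int) (q : String × Int) :
    ((es.foldl (fun (st : PySem.Dict Char Int × List Int) p =>
        if st.1.getD p.2 0 > 0 then (st.1.modify p.2 0 (· - 1), st.2)
        else (st.1, st.2 ++ [p.1])) (d, fs)).2).foldl (bstep s2) q
    = (es.foldl (fun (st : PySem.Dict Char Int × (String × Int)) p =>
        if st.1.getD p.2 0 > 0 then (st.1.modify p.2 0 (· - 1), st.2)
        else (st.1, bstep s2 st.2 p.1)) (d, fs.foldl (bstep s2) q)).2 := by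
  induction es generalizing d fs q with
  | nil => rfl
  | cons p es ih =>
    simp only [List.foldl_cons]
    by_cases h : d.getD p.2 0 > 0
    · rw [if_pos h, if_pos h]; exact ih _ _ _
    · rw [if_neg h, if_neg h]
      rw [ih _ _ _, List.foldl_append, List.foldl_cons, List.foldl_nil]

-- A's third pass over a run list, as a function
def scan3 (l : List (List Char)) : String × Nat :=
  l.foldl (fun (p : String × Nat) x => if x.length > p.2 then (String.ofList x, x.length) else p) ("", 0)

-- main invariant: A's run-collecting loop vs B's fused index loop
lemma loop_inv (s2 cs : List Char) (k : Nat) (hcs : s2.drop k = cs)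
    (l : List (List Char)) (path : List Char) (dic : PySem.Dict Char Int)
    (best : String) (prev : Int)
    (hprev : -1 ≤ prev ∧ prev < (k : Int))
    (hpath : (s2.drop (prev + 1).toNat).take ((k : Int) - prev - 1).toNat = path)
    (hlen : (path.length : Int) = (k : Int) - prev - 1)
    (hb : scan3 l = (best, best.toList.length)) :
    (scan3 (cs.foldl
      (fun (st : List (List Char) × List Char × PySem.Dict Char Int) x =>
        if st.2.2.contains x ∧ st.2.2.getD x 0 > 0 then
          (st.1, st.2.1 ++ [x], st.2.2.modify x 0 (· - 1))
        else
          (st.1 ++ [st.2.1], [], st.2.2)) (l, path, dic)).1).1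
    = ((PySem.List.enumerate cs (k : Int)).foldl
      (fun (st : PySem.Dict Char Int × (String × Int)) p =>
        if st.1.getD p.2 0 > 0 then (st.1.modify p.2 0 (· - 1), st.2)
        else (st.1, bstep s2 st.2 p.1)) (dic, (best, prev))).2.1 := by
  induction cs generalizing k l path dic best prev with
  | nil => simp [PySem.List.enumerate]; rw [hb]
  | cons x cs ih =>
    rw [PySem.List.enumerate_cons, List.foldl_cons, List.foldl_cons]
    have hx : s2[k]? = some x := by
      have : (s2.drop k)[0]? = some x := by rw [hcs]; rfl
      simpa using this
    have hcs' : s2.drop (k + 1) = cs := by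
      have := congrArg List.tail hcs
      simpa [List.tail_drop] using this
    have hcond : (dic.contains x ∧ dic.getD x 0 > 0) ↔ dic.getD x 0 > 0 := by
      constructor
      · exact fun h => h.2
      · intro h
        refine ⟨?_, h⟩
        by_contra hcc
        simp only [Bool.not_eq_true] at hcc
        rw [PySem.Dict.getD_of_not_contains _ _ hcc] at h
        omega
    by_cases h : dic.getD x 0 > 0
    · -- matched: path grows by x, same prev/best
      rw [if_pos (hcond.mpr h), if_pos h]
      have hk1 : ((k : Int) + 1) = ((k + 1 : Nat) : Int) := by push_cast; ring
      rw [hk1]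
      refine ih (k + 1) hcs' l (path ++ [x]) _ best prev
        ⟨hprev.1, by push_cast; omega⟩ ?_ (by simp; omega) hb
      have hn : (((k + 1 : Nat) : Int) - prev - 1).toNat
          = (((k : Int) - prev - 1)).toNat + 1 := by omega
      rw [hn, List.take_add_one, hpath]
      have hidx : (s2.drop (prev + 1).toNat)[((k : Int) - prev - 1).toNat]? = some x := by
        rw [List.getElem?_drop]
        have : (prev + 1).toNat + ((k : Int) - prev - 1).toNat = k := by omega
        rw [this, hx]
      rw [hidx]; rfl
    · -- fail at index k: A closes the run, B updates best from indices and slices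
      rw [if_neg (fun hh => h (hcond.mp hh)), if_neg h]
      have hslice : PySem.List.slice s2 (some (prev + 1)) (some ((k : Int))) = path := by
        rw [PySem.List.slice_toNat s2 (by omega) (by omega)]
        have h1 : ((k : Int)).toNat - (prev + 1).toNat = ((k : Int) - prev - 1).toNat := by omega
        rw [h1]; exact hpath
      have hbstep : bstep s2 (best, prev) (k : Int)
          = (if path.length > best.toList.length then String.ofList path else best, (k : Int)) := by
        unfold bstep
        rw [PySem.Str.len_eq, hslice]
        by_cases hgt : path.length > best.toList.length
        · rw [if_pos (by push_cast; omega), if_pos hgt]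
        · rw [if_neg (by push_cast; omega), if_neg hgt]
      rw [hbstep]
      have hk1 : ((k : Int) + 1) = ((k + 1 : Nat) : Int) := by push_cast; ring
      rw [hk1]
      refine ih (k + 1) hcs' (l ++ [path]) [] dic _ (k : Int)
        ⟨by omega, by push_cast; omega⟩ ?_ (by simp) ?_
      · have : (((k + 1 : Nat) : Int) - (k : Int) - 1).toNat = 0 := by omega
        rw [this]; simp
      · -- scan3 (l ++ [path]) matches B's conditional best update
        simp only [scan3, List.foldl_append, List.foldl_cons, List.foldl_nil]
        rw [show l.foldl (fun (p : String × Nat) x =>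
              if x.length > p.2 then (String.ofList x, x.length) else p) ("", 0) = scan3 l from rfl,
            hb]
        by_cases hgt : path.length > best.toList.length
        · rw [if_pos hgt, if_pos hgt, String.toList_ofList]
        · rw [if_neg hgt, if_neg hgt]

-- ===== VERDICT (by name: the statement is the Claim_ definition above) =====
theorem findmatcher_spec : Claim_equal_findmatcher := by
  intro str1 str2 _
  unfold Spec_findmatcher findmatcher findmatcher_alt
  dsimp only
  rw [dict_eq]
  rw [show (fun (q : String × Int) i =>
        (if i - q.2 - 1 > PySem.Str.len q.1 then
           String.ofList (PySem.List.slice str2.toList (some (q.2 + 1)) (some i))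
         else q.1, i)) = bstep str2.toList from rfl]
  rw [fuse]
  have h := loop_inv str2.toList str2.toList 0 (by simp)
      [] [] (str1.toList.foldl (fun d c => d.insert c (d.getD c 0 + 1)) PySem.Dict.empty)
      "" (-1) ⟨le_refl _, by omega⟩ (by norm_num) (by norm_num) rfl
  simp only [Nat.cast_zero] at h
  simpa [scan3, List.foldl_nil] using h
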